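-- pv_equiv track=rewrite | github.com/jebreimo/Argen | argparser.py | inferOptionIndentation
-- ===== SOURCE A (Python) =====
-- def inferIndentation(line):
--     gaps = []
--     start = -1
--     for i, c in enumerate(line):
--         if c.isspace():
--             if start == -1:
--                 start = i
--         elif start != -1:
--             if i - start > 1:
--                 gaps.append((i - start, start))
--             start = -1
--     if start != -1:
--         gaps.append((len(line) - start, start))
--     if not gaps:
--         return 0
--     gaps.sort()
--     return gaps[-1][0] + gaps[-1][1]
--
-- def inferOptionIndentation(text, lineNos):
--     lines = text.split("\n")
--     widths = {}
--     for lineNo in lineNos: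
--         width = inferIndentation(lines[lineNo])
--         if width in widths:
--             widths[width] += 1
--         else:
--             widths[width] = 1
--     n, width = 0, 0
--     for key in widths:
--         if widths[key] > n or widths[key] == n and key > width:
--             n, width = widths[key], key
--     return width
-- ===== SOURCE B (Python) =====
-- def _bestGapIndent(line):
--     # streaming: running lexicographic best (length, start) instead of list+sort
--     best = None
--     start = -1
--     for i, c in enumerate(line):
--         if c.isspace():
--             if start == -1:
--                 start = i
--         else:
--             if start != -1 and i - start > 1:
--                 g = (i - start, start)
--                 if best is None or g > best:
--                     best = g
--             start = -1
--     if start != -1: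
--         g = (len(line) - start, start)
--         if best is None or g > best:
--             best = g
--     return best[0] + best[1] if best is not None else 0
--
-- def inferOptionIndentation(text, lineNos):
--     lines = text.split("\n")
--     widths = {}
--     for lineNo in lineNos:
--         w = _bestGapIndent(lines[lineNo])
--         widths[w] = widths.get(w, 0) + 1
--     if not widths:
--         return 0
--     return max(widths.items(), key=lambda kv: (kv[1], kv[0]))[0]
-- ===== Notes on version B (the rewrite author's own statement) =====
-- stated objective: simpler
-- what changed: B replaces A's gaps-list-plus-sort in the line scan with a single streaming running lexicographic best, and replaces A's manual running argmax over the counts dict with one max over its items keyed by (count, width).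
import Mathlib
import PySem

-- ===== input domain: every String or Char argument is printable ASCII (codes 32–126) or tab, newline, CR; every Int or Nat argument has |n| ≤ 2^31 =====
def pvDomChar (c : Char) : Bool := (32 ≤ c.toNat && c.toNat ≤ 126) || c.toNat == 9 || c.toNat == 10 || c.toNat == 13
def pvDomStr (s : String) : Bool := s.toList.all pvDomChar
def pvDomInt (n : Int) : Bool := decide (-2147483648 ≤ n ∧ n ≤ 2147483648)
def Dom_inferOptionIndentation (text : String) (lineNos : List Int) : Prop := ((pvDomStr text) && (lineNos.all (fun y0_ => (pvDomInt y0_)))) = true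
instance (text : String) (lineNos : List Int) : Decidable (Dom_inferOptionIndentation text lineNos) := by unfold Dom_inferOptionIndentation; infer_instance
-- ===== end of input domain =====

-- B replaces A's gaps-list-plus-sort with a streaming running lexicographic best and A's manual
-- argmax loop over the counts dict with a single max over its items (objective: simpler).

-- ===== PORT A =====
-- A's character loop: collect (length, start) of each whitespace run of length > 1
def pvGapsStepA (st : List (Int × Int) × Int) (ic : Int × Char) : List (Int × Int) × Int :=
  if PySem.Chars.isspace ic.2 then
    (if st.2 = -1 then (st.1, ic.1) else st)
  else if st.2 ≠ -1 then
    ((if ic.1 - st.2 > 1 then st.1 ++ [(ic.1 - st.2, st.2)] else st.1), -1)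
  else st

-- gaps.sort() is Python's lexicographic tuple sort: key = toLex into Int ×ₗ Int
def inferIndentationA (line : String) : Int :=
  let r := (PySem.List.enumerate line.toList 0).foldl pvGapsStepA ([], -1)
  let gaps := if r.2 ≠ -1 then r.1 ++ [(PySem.Str.len line - r.2, r.2)] else r.1
  if gaps = [] then 0
  else
    let sg := PySem.List.sorted gaps (fun g => (toLex g : Int ×ₗ Int)) false
    (PySem.List.pyGetD sg (-1) ((0 : Int), (0 : Int))).1
      + (PySem.List.pyGetD sg (-1) ((0 : Int), (0 : Int))).2

def inferOptionIndentation (text : String) (lineNos : List Int) : Int :=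
  let lines := (PySem.Str.split? text "\n").getD []
  let widths := lineNos.foldl (fun d lineNo =>
      let width := inferIndentationA (PySem.List.pyGetD lines lineNo "")
      if d.contains width then d.insert width (d.getD width 0 + 1) else d.insert width 1)
    (PySem.Dict.empty : PySem.Dict Int Int)
  (widths.keys.foldl (fun nw key =>
      if widths.getD key 0 > nw.1 ∨ (widths.getD key 0 = nw.1 ∧ key > nw.2)
      then (widths.getD key 0, key) else nw) ((0 : Int), (0 : Int))).2

-- ===== PORT B =====
-- 'if best is None or g > best: best = g'  (Python tuple compare = lex)
def pvBestStep (best : Option (Int × Int)) (g : Int × Int) : Option (Int × Int) :=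
  match best with
  | none => some g
  | some b => if (toLex b : Int ×ₗ Int) < toLex g then some g else some b

def pvScanStepB (st : Option (Int × Int) × Int) (ic : Int × Char) : Option (Int × Int) × Int :=
  if PySem.Chars.isspace ic.2 then
    (if st.2 = -1 then (st.1, ic.1) else st)
  else
    ((if st.2 ≠ -1 ∧ ic.1 - st.2 > 1 then pvBestStep st.1 (ic.1 - st.2, st.2) else st.1), -1)

def inferIndentationB (line : String) : Int :=
  let r := (PySem.List.enumerate line.toList 0).foldl pvScanStepB (none, -1)
  let best := if r.2 ≠ -1 then pvBestStep r.1 (PySem.Str.len line - r.2, r.2) else r.1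
  match best with
  | none => 0
  | some b => b.1 + b.2

def inferOptionIndentation_alt (text : String) (lineNos : List Int) : Int :=
  let lines := (PySem.Str.split? text "\n").getD []
  let widths := lineNos.foldl (fun d lineNo =>
      let w := inferIndentationB (PySem.List.pyGetD lines lineNo "")
      d.insert w (d.getD w 0 + 1))
    (PySem.Dict.empty : PySem.Dict Int Int)
  -- max(widths.items(), key=lambda kv: (kv[1], kv[0]))[0], 0 when empty
  match PySem.List.max? widths.items (fun kv => (toLex (kv.2, kv.1) : Int ×ₗ Int)) with
  | none => 0
  | some kv => kv.1

-- ===== PRECONDITION & SPEC =====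
-- Pre_ excludes exactly the inputs where lines[lineNo] raises IndexError in both programs.
def Pre_inferOptionIndentation (text : String) (lineNos : List Int) : Prop :=
  ∀ n ∈ lineNos, PySem.Raise.InRange ((PySem.Str.split? text "\n").getD []).length n
instance (text : String) (lineNos : List Int) : Decidable (Pre_inferOptionIndentation text lineNos) := by unfold Pre_inferOptionIndentation; infer_instance
def pvWitness_inferOptionIndentation : String × List Int := ("  x\ny   z", [0, 1, -1])

def Spec_inferOptionIndentation (text : String) (lineNos : List Int) (out : Int) : Prop := out = inferOptionIndentation_alt text lineNos
instance (text : String) (lineNos : List Int) (out : Int) : Decidable (Spec_inferOptionIndentation text lineNos out) := by unfold Spec_inferOptionIndentation; infer_instance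

-- ===== CLAIM (what is proved, stated in full; the proofs are below) =====
def Claim_equal_inferOptionIndentation : Prop := ∀ (text : String) (lineNos : List Int), Dom_inferOptionIndentation text lineNos → Pre_inferOptionIndentation text lineNos → Spec_inferOptionIndentation text lineNos (inferOptionIndentation text lineNos)

-- ===== LEMMAS AND PROOFS =====

-- proof-side copies of the two fold steps (stable names for rewriting)
def pvMaxStep (acc : Option (Int × Int)) (x : Int × Int) : Option (Int × Int) :=
  match acc with
  | none => some x
  | some m => if (toLex (m.2, m.1) : Int ×ₗ Int) < toLex (x.2, x.1) then some x else some m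

def pvSelStep (nw kc : Int × Int) : Int × Int :=
  if kc.2 > nw.1 ∨ (kc.2 = nw.1 ∧ kc.1 > nw.2) then (kc.2, kc.1) else nw

-- B's running best over a gap list is exactly max? with the lex key
theorem pv_bfold_eq_max? (G : List (Int × Int)) :
    G.foldl pvBestStep none = PySem.List.max? G (fun g => (toLex g : Int ×ₗ Int)) := by
  simp only [PySem.List.max?]
  exact List.foldl_ext _ _ _ (fun acc x _ => by cases acc <;> rfl)

theorem pv_maxfold_eq_max? (l : List (Int × Int)) :
    l.foldl pvMaxStep none = PySem.List.max? l (fun kv => (toLex (kv.2, kv.1) : Int ×ₗ Int)) := by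
  simp only [PySem.List.max?]
  exact List.foldl_ext _ _ _ (fun acc x _ => by cases acc <;> rfl)

-- the char scan of A (gaps list) and of B (running best) stay in lock step
theorem pv_scan_inv (l : List (Int × Char)) :
    ∀ (G : List (Int × Int)) (s : Int),
      l.foldl pvScanStepB (G.foldl pvBestStep none, s)
        = ((l.foldl pvGapsStepA (G, s)).1.foldl pvBestStep none,
           (l.foldl pvGapsStepA (G, s)).2) := by
  induction l with
  | nil => intro G s; rfl
  | cons ic l ih =>
      intro G s
      simp only [List.foldl_cons]
      by_cases hsp : PySem.Chars.isspace ic.2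
      · by_cases hs : s = -1 <;>
          simp only [pvScanStepB, pvGapsStepA, hsp, hs, reduceIte] <;> exact ih G _
      · by_cases hs : s = -1
        · simp only [pvScanStepB, pvGapsStepA, hsp, hs, reduceIte, ne_eq,
            not_true_eq_false, false_and, if_false]
          exact ih G _
        · by_cases hgt : ic.1 - s > 1
          · simp only [pvScanStepB, pvGapsStepA, hsp, hs, hgt, ne_eq, not_false_eq_true, and_self,
              reduceIte, if_true]
            have hb : pvBestStep (G.foldl pvBestStep none) (ic.1 - s, s)
                = (G ++ [(ic.1 - s, s)]).foldl pvBestStep none := by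
              simp [List.foldl_append]
            rw [hb]; exact ih _ _
          · simp only [pvScanStepB, pvGapsStepA, hsp, hs, hgt, ne_eq, not_false_eq_true,
              and_false, reduceIte, if_false]
            exact ih G _

-- last element of Python's sort = first maximal element (values coincide: lex is antisymmetric)
theorem pv_last_sorted (G : List (Int × Int)) :
    (PySem.List.sorted G (fun g => (toLex g : Int ×ₗ Int)) false).getLast?
      = PySem.List.max? G (fun g => (toLex g : Int ×ₗ Int)) := by
  by_cases hG : G = []
  · subst hG; rfl
  · have hs : PySem.List.sorted G (fun g => (toLex g : Int ×ₗ Int)) false ≠ [] := by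
      rw [Ne, PySem.List.sorted_eq_nil_iff]; exact hG
    obtain ⟨m', hm'⟩ : ∃ m', PySem.List.max? G (fun g => (toLex g : Int ×ₗ Int)) = some m' := by
      cases h : PySem.List.max? G (fun g => (toLex g : Int ×ₗ Int)) with
      | none => exact absurd ((PySem.List.max?_eq_none_iff _ _).1 h) hG
      | some m => exact ⟨m, rfl⟩
    set S := PySem.List.sorted G (fun g => (toLex g : Int ×ₗ Int)) false with hS
    have hlen : 0 < S.length := List.length_pos_of_ne_nil hs
    have hlast : S.getLast? = some (S.getLast hs) := List.getLast?_eq_some_getLast hs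
    set m := S.getLast hs with hm
    have hmS : m ∈ S := List.getLast_mem hs
    have hmG : m ∈ G := (PySem.List.mem_sorted _ _ _ _).1 hmS
    have hm'G : m' ∈ G := PySem.List.max?_mem hm'
    have h1 : (toLex m : Int ×ₗ Int) ≤ toLex m' := PySem.List.max?_isMax hm' m hmG
    have h2 : (toLex m' : Int ×ₗ Int) ≤ toLex m := by
      have hm'S : m' ∈ S := (PySem.List.mem_sorted _ _ _ _).2 hm'G
      obtain ⟨p, hp, hpe⟩ := List.mem_iff_getElem.1 hm'S
      have hml : m = S[S.length - 1] := List.getLast_eq_getElem hs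
      have hmono := PySem.List.key_sorted_getElem_mono G (fun g => (toLex g : Int ×ₗ Int))
        (p := p) (q := S.length - 1) (by omega) (by rw [← hS]; omega)
      simp only [← hS] at hmono
      rw [hpe, ← hml] at hmono; exact hmono
    have hmm : m = m' := toLex.injective (le_antisymm h1 h2)
    rw [hlast, hmm, hm']

-- the two single-line scans agree
theorem pv_infer_eq (line : String) : inferIndentationA line = inferIndentationB line := by
  unfold inferIndentationA inferIndentationB
  have h0 : (none : Option (Int × Int)) = ([] : List (Int × Int)).foldl pvBestStep none := rfl
  rw [h0, pv_scan_inv]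
  set r := (PySem.List.enumerate line.toList 0).foldl pvGapsStepA ([], -1) with hr
  have main : ∀ G : List (Int × Int),
      (if G = [] then 0
       else
         let sg := PySem.List.sorted G (fun g => (toLex g : Int ×ₗ Int)) false
         (PySem.List.pyGetD sg (-1) ((0 : Int), (0 : Int))).1
           + (PySem.List.pyGetD sg (-1) ((0 : Int), (0 : Int))).2)
      = (match G.foldl pvBestStep none with
         | none => (0 : Int)
         | some b => b.1 + b.2) := by
    intro G
    rw [pv_bfold_eq_max?, ← pv_last_sorted]
    by_cases hG : G = []
    · subst hG; rfl
    · have hsn : PySem.List.sorted G (fun g => (toLex g : Int ×ₗ Int)) false ≠ [] := by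
        rw [Ne, PySem.List.sorted_eq_nil_iff]; exact hG
      rw [if_neg hG]
      simp only [PySem.List.pyGetD_neg_one _ _ hsn, List.getLast?_eq_some_getLast hsn]
  by_cases hflush : r.2 ≠ -1
  · have hb : pvBestStep (r.1.foldl pvBestStep none) (PySem.Str.len line - r.2, r.2)
        = (r.1 ++ [(PySem.Str.len line - r.2, r.2)]).foldl pvBestStep none := by
      simp [List.foldl_append]
    simp only [if_pos hflush]
    rw [hb]
    exact main _
  · simp only [if_neg hflush]
    exact main _

-- the two count-building loops build the same dict
theorem pv_widths_eq (lines : List String) (lineNos : List Int) :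
    lineNos.foldl (fun d lineNo =>
        let width := inferIndentationA (PySem.List.pyGetD lines lineNo "")
        if d.contains width then d.insert width (d.getD width 0 + 1) else d.insert width 1)
      (PySem.Dict.empty : PySem.Dict Int Int)
    = lineNos.foldl (fun d lineNo =>
        let w := inferIndentationB (PySem.List.pyGetD lines lineNo "")
        d.insert w (d.getD w 0 + 1))
      (PySem.Dict.empty : PySem.Dict Int Int) := by
  apply PySem.List.foldl_congr_mem
  intro d lineNo _
  rw [show inferIndentationA (PySem.List.pyGetD lines lineNo "")
      = inferIndentationB (PySem.List.pyGetD lines lineNo "") from pv_infer_eq _]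
  set w := inferIndentationB (PySem.List.pyGetD lines lineNo "")
  by_cases h : d.contains w
  · simp [h]
  · have hf : d.contains w = false := by simpa using h
    simp [hf, PySem.Dict.getD_of_not_contains d 0 hf]

-- every count stored by the loop is ≥ 1
theorem pv_items_pos {α : Type} (ws : List α) (k : α → Int) :
    ∀ d : PySem.Dict Int Int, (∀ p ∈ d.items, 1 ≤ p.2) →
      ∀ p ∈ (ws.foldl (fun d x => d.insert (k x) (d.getD (k x) 0 + 1)) d).items, 1 ≤ p.2 := by
  induction ws with
  | nil => intro d h; exact h
  | cons w ws ih =>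
      intro d h
      simp only [List.foldl_cons]
      apply ih
      intro p hp
      rcases (PySem.Dict.mem_items_insert d (k w) _ p).1 hp with rfl | ⟨hpd, _⟩
      · have h0 : 0 ≤ d.getD (k w) 0 := by
          rw [PySem.Dict.getD_eq_get?_getD]
          cases hg : d.get? (k w) with
          | none => simp
          | some v =>
              have hv := h (k w, v) (PySem.Dict.mem_items_of_get?_eq_some d hg)
              simp only [Option.getD_some]
              omega
        simp only []
        omega
      · exact h p hpd

-- A's manual running argmax = B's first-maximal under the (count, key) lex key
theorem pv_sel_inv (l : List (Int × Int)) :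
    ∀ b : Option (Int × Int), (∀ p ∈ l, 1 ≤ p.2) →
      l.foldl pvSelStep (match b with | none => ((0 : Int), (0 : Int)) | some kv => (kv.2, kv.1))
      = (match l.foldl pvMaxStep b with
         | none => ((0 : Int), (0 : Int)) | some kv => (kv.2, kv.1)) := by
  induction l with
  | nil => intro b _; rfl
  | cons kc l ih =>
      intro b hpos
      have hc : 1 ≤ kc.2 := hpos kc (by simp)
      simp only [List.foldl_cons]
      cases b with
      | none =>
          have hcond : (kc.2 > (0 : Int) ∨ (kc.2 = (0 : Int) ∧ kc.1 > (0 : Int))) := by left; omega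
          have hstep : pvSelStep ((0 : Int), (0 : Int)) kc = (kc.2, kc.1) := by
            simp [pvSelStep, hcond]
          rw [show pvMaxStep none kc = some kc from rfl, hstep]
          exact ih (some kc) (fun p hp => hpos p (by simp [hp]))
      | some m =>
          have hiff : (kc.2 > m.2 ∨ (kc.2 = m.2 ∧ kc.1 > m.1))
              ↔ (toLex (m.2, m.1) : Int ×ₗ Int) < toLex (kc.2, kc.1) := by
            rw [Prod.Lex.toLex_lt_toLex]
            constructor
            · rintro (h | ⟨h1, h2⟩)
              · left; exact h
              · right; exact ⟨h1.symm, h2⟩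
            · rintro (h | ⟨h1, h2⟩)
              · left; exact h
              · right; exact ⟨h1.symm, h2⟩
          by_cases h : (toLex (m.2, m.1) : Int ×ₗ Int) < toLex (kc.2, kc.1)
          · rw [show pvMaxStep (some m) kc
                = if (toLex (m.2, m.1) : Int ×ₗ Int) < toLex (kc.2, kc.1) then some kc else some m
                from rfl, if_pos h,
              show pvSelStep (m.2, m.1) kc = if kc.2 > m.2 ∨ (kc.2 = m.2 ∧ kc.1 > m.1)
                then (kc.2, kc.1) else (m.2, m.1) from rfl, if_pos (hiff.2 h)]
            exact ih (some kc) (fun p hp => hpos p (by simp [hp]))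
          · rw [show pvMaxStep (some m) kc
                = if (toLex (m.2, m.1) : Int ×ₗ Int) < toLex (kc.2, kc.1) then some kc else some m
                from rfl, if_neg h,
              show pvSelStep (m.2, m.1) kc = if kc.2 > m.2 ∨ (kc.2 = m.2 ∧ kc.1 > m.1)
                then (kc.2, kc.1) else (m.2, m.1) from rfl, if_neg (fun hh => h (hiff.1 hh))]
            exact ih (some m) (fun p hp => hpos p (by simp [hp]))

-- selection over the items of the counts dict
theorem pv_sel (l : List (Int × Int)) (hpos : ∀ p ∈ l, 1 ≤ p.2) :
    (l.foldl pvSelStep ((0 : Int), (0 : Int))).2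
      = (match PySem.List.max? l (fun kv => (toLex (kv.2, kv.1) : Int ×ₗ Int)) with
         | none => (0 : Int) | some kv => kv.1) := by
  rw [← pv_maxfold_eq_max?]
  have h := pv_sel_inv l none hpos
  simp only [] at h
  rw [h]
  cases l.foldl pvMaxStep none <;> rfl

-- ===== VERDICT (by name: the statement is the Claim_ definition above) =====
theorem inferOptionIndentation_spec : Claim_equal_inferOptionIndentation := by
  intro text lineNos _ _
  unfold Spec_inferOptionIndentation inferOptionIndentation inferOptionIndentation_alt
  simp only []
  set lines := (PySem.Str.split? text "\n").getD [] with hlines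
  rw [pv_widths_eq lines lineNos]
  set widths := lineNos.foldl (fun d lineNo =>
      let w := inferIndentationB (PySem.List.pyGetD lines lineNo "")
      d.insert w (d.getD w 0 + 1)) (PySem.Dict.empty : PySem.Dict Int Int) with hw
  have hnd : widths.keys.Nodup := by
    rw [hw]
    exact PySem.Dict.nodup_keys_foldl_insert_key lineNos
      (fun lineNo => inferIndentationB (PySem.List.pyGetD lines lineNo ""))
      (fun d lineNo => d.getD (inferIndentationB (PySem.List.pyGetD lines lineNo "")) 0 + 1)
      PySem.Dict.empty PySem.Dict.nodup_keys_empty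
  have hpos : ∀ p ∈ widths.items, 1 ≤ p.2 := by
    rw [hw]
    exact pv_items_pos lineNos (fun lineNo => inferIndentationB (PySem.List.pyGetD lines lineNo ""))
      PySem.Dict.empty (by intro p hp; simp [PySem.Dict.empty] at hp)
  have hA : widths.keys.foldl (fun nw key =>
        if widths.getD key 0 > nw.1 ∨ (widths.getD key 0 = nw.1 ∧ key > nw.2)
        then (widths.getD key 0, key) else nw) ((0 : Int), (0 : Int))
      = widths.items.foldl pvSelStep ((0 : Int), (0 : Int)) := by
    rw [PySem.Dict.items_eq_map_keys widths hnd 0, List.foldl_map]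
    exact List.foldl_ext _ _ _ (fun acc k _ => rfl)
  rw [hA]
  exact pv_sel widths.items hpos
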